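-- pv_equiv track=rewrite | github.com/ReptilianEye/WDI | zestaw_2/t_03.py | n_to_bin
-- ===== SOURCE A (Python) =====
-- def n_to_bin(n):
--     wart = 9
--     # z obu stron liczby dodamy 9 jako wartowniki (aby zawzec wiodace zera) (na potrzeby programu)
--     bin_num = wart
--     while n > 0:
--         bin_num *= 10
--         bin_num += n % 2
--         n //= 2
--     bin_num = bin_num * 10 + wart
--     return bin_num
-- ===== SOURCE B (Python) =====
-- def n_to_bin(n):
--     L = n.bit_length() if n > 0 else 0
--     return 9 * 10 ** (L + 1) + sum(((n >> i) & 1) * 10 ** (L - i) for i in range(L)) + 9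
-- ===== Notes on version B (the rewrite author's own statement) =====
-- stated objective: alternative
-- what changed: Replaces A's sequential while-loop that repeatedly halves n while mutating a decimal accumulator by a closed-form expression: take the bit length L, then add the leading sentinel times a power of ten, a sum over bit positions of bit(i) times a power of ten, and the trailing sentinel, with no loop-carried state.
import Mathlib
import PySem

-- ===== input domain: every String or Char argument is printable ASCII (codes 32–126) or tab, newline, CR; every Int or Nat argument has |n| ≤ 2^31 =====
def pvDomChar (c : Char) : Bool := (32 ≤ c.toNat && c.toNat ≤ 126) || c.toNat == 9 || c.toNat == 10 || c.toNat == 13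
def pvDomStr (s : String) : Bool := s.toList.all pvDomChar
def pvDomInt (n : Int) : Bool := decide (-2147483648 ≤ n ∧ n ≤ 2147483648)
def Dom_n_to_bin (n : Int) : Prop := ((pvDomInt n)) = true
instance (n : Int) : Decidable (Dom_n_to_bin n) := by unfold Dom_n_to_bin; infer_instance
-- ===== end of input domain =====

-- B replaces A's digit-accumulating while-loop by a closed-form sum over bit positions
-- (bit_length, shifts and powers of 10); objective: alternative, same cost, no loop state.

-- ===== PORT A =====
-- 'while n > 0: bin_num = bin_num*10 + n % 2; n //= 2', transliterated as recursion on n.toNat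
def n_to_bin_loop (n bin_num : Int) : Int :=
  if h : 0 < n then
    n_to_bin_loop (PySem.Int.floordiv n 2) (bin_num * 10 + PySem.Int.mod n 2)
  else bin_num
termination_by n.toNat
decreasing_by rw [PySem.Int.floordiv_eq_ediv_of_pos (by omega : (0:Int) < 2)]; omega

def n_to_bin (n : Int) : Int := n_to_bin_loop n 9 * 10 + 9

-- ===== PORT B =====
-- L = n.bit_length() if n > 0 else 0; 9*10**(L+1) + sum(((n>>i)&1)*10**(L-i) for i in range(L)) + 9
def n_to_bin_alt (n : Int) : Int :=
  let L : Nat := if 0 < n then PySem.Int.bitLength n else 0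
  9 * 10 ^ (L + 1)
    + ((List.range L).map (fun i : Nat => PySem.Int.band (n >>> i) 1 * 10 ^ (L - i))).sum
    + 9

-- ===== PRECONDITION & SPEC =====
def Spec_n_to_bin (n : Int) (out : Int) : Prop := out = n_to_bin_alt n
instance (n : Int) (out : Int) : Decidable (Spec_n_to_bin n out) := by unfold Spec_n_to_bin; infer_instance

-- ===== CLAIM (what is proved, stated in full; the proofs are below) =====
def Claim_equal_n_to_bin : Prop := ∀ (n : Int), Dom_n_to_bin n → Spec_n_to_bin n (n_to_bin n)

-- ===== LEMMAS AND PROOFS =====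

-- the bit-digit tail A's loop appends below the leading 9: Σ_{i<L} ((m>>>i)%2) * 10^(L-1-i)
def gsum (m : Nat) : Int :=
  ((List.range (PySem.Int.bitLength (m : Int))).map
    (fun i => (((m >>> i) % 2 : Nat) : Int) * (10 : Int) ^ (PySem.Int.bitLength (m : Int) - 1 - i))).sum

theorem gsum_zero : gsum 0 = 0 := by simp [gsum]

theorem gsum_pos (m : Nat) (h : 0 < m) :
    gsum m = ((m % 2 : Nat) : Int) * 10 ^ (PySem.Int.bitLength (m : Int) - 1) + gsum (m / 2) := by
  have hshift : ∀ i : Nat, m >>> (i + 1) = (m / 2) >>> i := by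
    intro i; rw [Nat.add_comm, Nat.shiftRight_add, Nat.shiftRight_one]
  unfold gsum
  rw [PySem.Int.bitLength_natCast h, List.range_succ_eq_map, List.map_cons, List.sum_cons,
    List.map_map]
  congr 1
  apply congrArg List.sum
  apply List.map_congr_left
  intro i hi
  rw [List.mem_range] at hi
  simp only [Function.comp_apply, Nat.succ_eq_add_one, hshift]
  congr 1
  congr 1
  omega

theorem loop_eq (m : Nat) : ∀ acc : Int,
    n_to_bin_loop (m : Int) acc = acc * 10 ^ (PySem.Int.bitLength (m : Int)) + gsum m := by
  induction m using Nat.strong_induction_on with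
  | _ m ih =>
    intro acc
    rw [n_to_bin_loop]
    by_cases h : 0 < (m : Int)
    · have hm : 0 < m := by exact_mod_cast h
      rw [dif_pos h]
      have hfd : PySem.Int.floordiv (m : Int) 2 = ((m / 2 : Nat) : Int) := by
        exact_mod_cast PySem.Int.floordiv_natCast m 2
      have hmd : PySem.Int.mod (m : Int) 2 = ((m % 2 : Nat) : Int) := by
        exact_mod_cast PySem.Int.mod_natCast m 2
      rw [hfd, hmd, ih (m / 2) (Nat.div_lt_self hm one_lt_two),
        gsum_pos m hm, PySem.Int.bitLength_natCast hm]
      simp only [Nat.add_sub_cancel]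
      ring
    · have hm : m = 0 := by omega
      subst hm
      rw [dif_neg h]
      simp [gsum_zero]

-- ===== VERDICT (by name: the statement is the Claim_ definition above) =====
theorem n_to_bin_spec : Claim_equal_n_to_bin := by
  intro n _
  unfold Spec_n_to_bin n_to_bin n_to_bin_alt
  by_cases h : 0 < n
  · have hm : n = ((n.toNat : Nat) : Int) := by omega
    have hLpos : 0 < n.toNat := by omega
    rw [hm]
    simp only [if_pos (show (0:Int) < (n.toNat : Int) by exact_mod_cast hLpos)]
    rw [loop_eq n.toNat 9]
    have hmap : (List.range (PySem.Int.bitLength ((n.toNat : Nat) : Int))).map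
        (fun i : Nat => PySem.Int.band (((n.toNat : Nat) : Int) >>> i) 1
          * (10:Int) ^ (PySem.Int.bitLength ((n.toNat : Nat) : Int) - i))
        = (List.range (PySem.Int.bitLength ((n.toNat : Nat) : Int))).map
        (fun i : Nat => 10 * ((((n.toNat >>> i) % 2 : Nat) : Int)
          * (10:Int) ^ (PySem.Int.bitLength ((n.toNat : Nat) : Int) - 1 - i))) := by
      apply List.map_congr_left
      intro i hi
      rw [List.mem_range] at hi
      have h1 : ((n.toNat : Nat) : Int) >>> i = ((n.toNat >>> i : Nat) : Int) := by simp
      have h2 : PySem.Int.band ((n.toNat >>> i : Nat) : Int) 1 = (((n.toNat >>> i) % 2 : Nat) : Int) := by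
        rw [show ((1:Int)) = ((1:Nat):Int) by norm_num, PySem.Int.band_natCast,
          Nat.and_one_is_mod]
      have h3 : PySem.Int.bitLength ((n.toNat : Nat) : Int) - i
          = (PySem.Int.bitLength ((n.toNat : Nat) : Int) - 1 - i) + 1 := by omega
      rw [h1, h2, h3, pow_succ]
      ring
    rw [hmap, List.sum_map_mul_left]
    show (9 * 10 ^ PySem.Int.bitLength ((n.toNat : Nat) : Int) + gsum n.toNat) * 10 + 9 = _
    unfold gsum
    ring
  · rw [n_to_bin_loop, dif_neg h]
    simp only [if_neg h]
    norm_num
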